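-- pv_equiv track=rewrite | github.com/pieralukasz/echopad | echopad.py | filter_fillers
-- ===== SOURCE A (Python) =====
-- FILLER_WORDS = {"yeah", "yes", "yep", "yup", "okay", "ok", "mhm", "hmm", "uh",
--                 "um", "right", "sure", "great", "cool", "alright", "ah", "oh"}
--
-- def is_filler(text: str) -> bool:
--     words = set(text.strip().lower().strip(".,!?").split())
--     return bool(words) and len(words) <= 2 and words.issubset(FILLER_WORDS)
--
-- def filter_fillers(segments: list[dict]) -> list[dict]:
--     """Remove runs of 3+ consecutive filler-only segments from the same speaker."""
--     if not segments:
--         return segments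
--
--     result = []
--     filler_run = []
--
--     def flush_run():
--         if len(filler_run) < 3:
--             result.extend(filler_run)
--         # else: drop the entire run (3+ consecutive fillers)
--
--     for seg in segments:
--         if is_filler(seg["text"]):
--             if filler_run and filler_run[-1].get("speaker") != seg.get("speaker"):
--                 flush_run()
--                 filler_run = []
--             filler_run.append(seg)
--         else:
--             flush_run()
--             filler_run = []
--             result.append(seg)
--
--     flush_run()
--     return result
-- ===== SOURCE B (Python) =====
-- FILLER_WORDS = {"yeah", "yes", "yep", "yup", "okay", "ok", "mhm", "hmm", "uh",
--                 "um", "right", "sure", "great", "cool", "alright", "ah", "oh"}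
--
-- def is_filler(text: str) -> bool:
--     words = set(text.strip().lower().strip(".,!?").split())
--     return bool(words) and len(words) <= 2 and words.issubset(FILLER_WORDS)
--
-- def _prefix_runs(keys):
--     # out[i] = length of the maximal block of equal keys ending at i
--     out = []
--     for i, k in enumerate(keys):
--         out.append(out[-1] + 1 if i and k == keys[i - 1] else 1)
--     return out
--
-- def _suffix_runs(keys):
--     # out[i] = length of the maximal block of equal keys starting at i
--     out = [0] * len(keys)
--     for i in range(len(keys) - 1, -1, -1):
--         out[i] = out[i + 1] + 1 if i + 1 < len(keys) and keys[i] == keys[i + 1] else 1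
--     return out
--
-- def filter_fillers(segments: list[dict]) -> list[dict]:
--     """Remove runs of 3+ consecutive filler-only segments from the same speaker."""
--     keys = [(is_filler(s["text"]), s.get("speaker")) for s in segments]
--     left = _prefix_runs(keys)
--     right = _suffix_runs(keys)
--     return [s for s, (f, _), l, r in zip(segments, keys, left, right)
--             if not (f and l + r >= 4)]
-- ===== Notes on version B (the rewrite author's own statement) =====
-- stated objective: alternative
-- what changed: Replaces A's accumulator-and-flush single pass by a staged array computation: per-segment (filler,speaker) keys, prefix and suffix run-length arrays, then a boolean-mask filter keeping segment i unless it is filler and prefix_run[i]+suffix_run[i]-1 >= 3; no run buffer or flush control flow exists.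
import Mathlib
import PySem

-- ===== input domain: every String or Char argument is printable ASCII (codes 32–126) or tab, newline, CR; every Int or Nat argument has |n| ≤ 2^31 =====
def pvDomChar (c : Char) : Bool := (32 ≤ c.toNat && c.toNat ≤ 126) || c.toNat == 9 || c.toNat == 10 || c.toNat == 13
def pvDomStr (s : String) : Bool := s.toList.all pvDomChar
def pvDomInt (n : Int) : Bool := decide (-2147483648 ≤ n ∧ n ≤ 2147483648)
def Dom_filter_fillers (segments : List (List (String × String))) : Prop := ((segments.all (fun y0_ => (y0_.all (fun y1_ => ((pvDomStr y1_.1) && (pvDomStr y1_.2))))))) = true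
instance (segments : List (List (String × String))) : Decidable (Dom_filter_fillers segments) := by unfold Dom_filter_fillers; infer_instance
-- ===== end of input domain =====

-- B replaces A's accumulator-and-flush loop by staged passes: compute per-segment keys,
-- prefix and suffix run-length arrays, then filter by a per-index mask (objective: alternative; same O(n) cost).

-- ===== PORT A =====
-- shared module helper: FILLER_WORDS and is_filler (used by both A and B, as in Python)
def pvFillerWords : PySem.Set String :=
  PySem.Set.ofList ["yeah", "yes", "yep", "yup", "okay", "ok", "mhm", "hmm", "uh",
                    "um", "right", "sure", "great", "cool", "alright", "ah", "oh"]

-- seg["text"] / seg.get("speaker") on an association-list dict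
def pvGet? (seg : List (String × String)) (k : String) : Option String :=
  PySem.Dict.get? (PySem.Dict.mk seg) k

def pvIsFiller (text : String) : Bool :=
  let words : PySem.Set String :=
    PySem.Set.ofList (PySem.Str.split₀ (PySem.Str.stripChars (PySem.Str.lower (PySem.Str.strip text)) ".,!?"))
  (!words.isEmpty) && decide (PySem.Set.len words ≤ 2) && PySem.Set.issubset words pvFillerWords

-- flush_run: extend result with the pending run unless it has 3+ segments
def pvFlush (result run : List (List (String × String))) : List (List (String × String)) :=
  if run.length < 3 then result ++ run else result

-- the for-loop of A over (result, filler_run); seg["text"] is defined under Pre_ (key present)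
def pvLoopA : List (List (String × String)) → List (List (String × String)) →
    List (List (String × String)) → List (List (String × String))
  | result, run, [] => pvFlush result run
  | result, run, seg :: rest =>
    if pvIsFiller ((pvGet? seg "text").getD "") then
      match run.getLast? with
      | some last =>
        if pvGet? last "speaker" ≠ pvGet? seg "speaker" then
          pvLoopA (pvFlush result run) [seg] rest
        else
          pvLoopA result (run ++ [seg]) rest
      | none => pvLoopA result (run ++ [seg]) rest
    else
      pvLoopA (pvFlush result run ++ [seg]) [] rest

def filter_fillers (segments : List (List (String × String))) : List (List (String × String)) :=
  if segments = [] then segments else pvLoopA [] [] segments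

-- ===== PORT B =====
-- key of a segment: (is_filler(seg["text"]), seg.get("speaker"))
def pvKey (seg : List (String × String)) : Bool × Option String :=
  (pvIsFiller ((pvGet? seg "text").getD ""), pvGet? seg "speaker")

-- _prefix_runs: out[i] = out[i-1]+1 if keys[i] == keys[i-1] else 1; the accumulator pair
-- (prev, c) carries keys[i-1] and out[i-1] of the Python loop
def pvPreAux : List (Bool × Option String) → (Bool × Option String) → Nat → List Nat
  | [], _, _ => []
  | k :: ks, prev, c =>
    let c' := if k = prev then c + 1 else 1
    c' :: pvPreAux ks k c'

def pvPre : List (Bool × Option String) → List Nat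
  | [] => []
  | k :: ks => 1 :: pvPreAux ks k 1

-- _suffix_runs: Python fills the array backwards from the last index; this structural
-- recursion computes the tail's suffix runs first, exactly the same values
def pvSuf : List (Bool × Option String) → List Nat
  | [] => []
  | [_] => [1]
  | k :: k' :: ks =>
    let rs := pvSuf (k' :: ks)
    (if k = k' then rs.headD 0 + 1 else 1) :: rs

-- the final comprehension over zip(segments, keys, left, right)
def pvSelect : List (List (String × String)) → List (Bool × Option String) →
    List Nat → List Nat → List (List (String × String))
  | s :: ss, k :: ks, l :: ls, r :: rs =>
    if k.1 && decide (4 ≤ l + r) then pvSelect ss ks ls rs else s :: pvSelect ss ks ls rs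
  | _, _, _, _ => []

def filter_fillers_alt (segments : List (List (String × String))) : List (List (String × String)) :=
  let keys := segments.map pvKey
  pvSelect segments keys (pvPre keys) (pvSuf keys)

-- ===== PRECONDITION & SPEC =====
-- Pre_ excludes exactly the inputs where A raises KeyError: a segment without a "text" key.
def Pre_filter_fillers (segments : List (List (String × String))) : Prop :=
  ∀ seg ∈ segments, (pvGet? seg "text").isSome = true
instance (segments : List (List (String × String))) : Decidable (Pre_filter_fillers segments) := by
  unfold Pre_filter_fillers; infer_instance

def pvWitness_filter_fillers : (List (List (String × String))) :=
  [[("text", "ok"), ("speaker", "a")], [("text", "hello there")], [("text", "um")]]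

def Spec_filter_fillers (segments : List (List (String × String))) (out : List (List (String × String))) : Prop := out = filter_fillers_alt segments
instance (segments : List (List (String × String))) (out : List (List (String × String))) : Decidable (Spec_filter_fillers segments out) := by unfold Spec_filter_fillers; infer_instance

-- ===== CLAIM (what is proved, stated in full; the proofs are below) =====
def Claim_equal_filter_fillers : Prop := ∀ (segments : List (List (String × String))), Dom_filter_fillers segments → Pre_filter_fillers segments → Spec_filter_fillers segments (filter_fillers segments)

-- ===== LEMMAS AND PROOFS =====

-- proof-only intermediate: the maximal-run (groupby) view both ports are reduced to
def pvGroups : List (List (String × String)) → List ((Bool × Option String) × List (List (String × String)))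
  | [] => []
  | seg :: rest =>
    (pvKey seg, seg :: rest.takeWhile (fun t => pvKey t == pvKey seg)) ::
      pvGroups (rest.dropWhile (fun t => pvKey t == pvKey seg))
  termination_by l => l.length
  decreasing_by
    simp only [List.length_cons]
    exact Nat.lt_succ_of_le (List.length_dropWhile_le _ _)

def pvEmit : List ((Bool × Option String) × List (List (String × String))) →
    List (List (String × String))
  | [] => []
  | (k, run) :: gs => if k.1 && decide (3 ≤ run.length) then pvEmit gs else run ++ pvEmit gs

-- takeWhile/dropWhile of l1 ++ l2 when all of l1 passes and l2's head (if any) fails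
theorem pv_tw_dw {α : Type} (p : α → Bool) :
    ∀ (l1 l2 : List α), (∀ x ∈ l1, p x = true) → (∀ r ∈ l2.head?, p r = false) →
      (l1 ++ l2).takeWhile p = l1 ∧ (l1 ++ l2).dropWhile p = l2 := by
  intro l1
  induction l1 with
  | nil =>
    intro l2 _ h2
    cases l2 with
    | nil => simp
    | cons b bs =>
      have hb : p b = false := h2 b (by simp)
      simp [List.takeWhile_cons, List.dropWhile_cons, hb]
  | cons a as ih =>
    intro l2 h1 h2
    have ha : p a = true := h1 a (by simp)
    have := ih l2 (fun x hx => h1 x (by simp [hx])) h2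
    simp [List.takeWhile_cons, List.dropWhile_cons, ha, this.1, this.2]

-- a maximal run of key k is the first group of pvGroups
theorem pvGroups_run (k : Bool × Option String) (run rest : List (List (String × String)))
    (hne : run ≠ []) (hall : ∀ t ∈ run, pvKey t = k)
    (hstop : ∀ r ∈ rest.head?, pvKey r ≠ k) :
    pvGroups (run ++ rest) = (k, run) :: pvGroups rest := by
  cases run with
  | nil => exact absurd rfl hne
  | cons a as =>
    have hka : pvKey a = k := hall a (by simp)
    have htw := pv_tw_dw (fun t => pvKey t == pvKey a) as rest
      (fun x hx => by simp [hka, hall x (by simp [hx])])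
      (fun r hr => by simp [hka]; exact hstop r hr)
    rw [List.cons_append, pvGroups]
    rw [htw.1, htw.2, hka]

-- a non-filler head is always kept, one segment at a time
theorem pvEmit_groups_nonfiller (seg : List (String × String))
    (rest : List (List (String × String))) (h : (pvKey seg).1 = false) :
    pvEmit (pvGroups (seg :: rest)) = seg :: pvEmit (pvGroups rest) := by
  rw [pvGroups, pvEmit]
  simp only [h, Bool.false_and, if_neg (Bool.false_ne_true)]
  have hsplit : rest = rest.takeWhile (fun t => pvKey t == pvKey seg) ++
      rest.dropWhile (fun t => pvKey t == pvKey seg) := (List.takeWhile_append_dropWhile).symm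
  cases htw : rest.takeWhile (fun t => pvKey t == pvKey seg) with
  | nil =>
    have hdw : rest.dropWhile (fun t => pvKey t == pvKey seg) = rest := by
      conv_rhs => rw [hsplit]
      rw [htw]; simp
    simp [hdw]
  | cons b bs =>
    have hgr : pvGroups rest = (pvKey seg, b :: bs) ::
        pvGroups (rest.dropWhile (fun t => pvKey t == pvKey seg)) := by
      conv_lhs => rw [hsplit]
      rw [htw]
      refine pvGroups_run _ _ _ (by simp) ?_ ?_
      · intro t ht
        have ht' : t ∈ rest.takeWhile (fun t => pvKey t == pvKey seg) := by
          rw [htw]; exact ht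
        have := List.mem_takeWhile_imp ht'
        simpa using this
      · intro r hr
        have h0 := List.head?_dropWhile_not (fun t => pvKey t == pvKey seg) rest
        cases hh : (rest.dropWhile (fun t => pvKey t == pvKey seg)).head? with
        | none => rw [hh] at hr; simp at hr
        | some x =>
          rw [hh] at h0 hr
          simp only [Option.mem_some_iff] at hr
          subst hr
          simpa using h0
    rw [hgr, pvEmit]
    simp [h]

theorem pvFlush_eq (result run : List (List (String × String))) :
    pvFlush result run = result ++ (if run.length < 3 then run else []) := by
  unfold pvFlush; split <;> simp

-- kept value of one filler group
theorem pvEmit_filler_group (k : Bool × Option String) (run : List (List (String × String)))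
    (hk : k.1 = true) (gs : List ((Bool × Option String) × List (List (String × String)))) :
    pvEmit ((k, run) :: gs) = (if run.length < 3 then run else []) ++ pvEmit gs := by
  rw [pvEmit, hk]
  by_cases h3 : 3 ≤ run.length
  · simp [h3, Nat.not_lt.2 h3]
  · simp [h3, Nat.lt_of_not_le h3]

-- main A invariant: A's loop state (result, run) versus the group view of run ++ segs,
-- where run is a (possibly empty) same-key filler run
set_option maxHeartbeats 1000000 in
theorem pvLoopA_eq (segs : List (List (String × String))) :
    ∀ (result run : List (List (String × String))) (k : Bool × Option String),
      k.1 = true → (∀ t ∈ run, pvKey t = k) →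
      pvLoopA result run segs = result ++ pvEmit (pvGroups (run ++ segs)) := by
  induction segs with
  | nil =>
    intro result run k hk hall
    rw [pvLoopA]
    cases hrun : run with
    | nil => simp [pvFlush, pvGroups, pvEmit]
    | cons a as =>
      have hgr := pvGroups_run k run [] (by simp [hrun]) hall (by simp)
      rw [List.append_nil] at hgr
      rw [← hrun, List.append_nil, hgr, pvEmit_filler_group k run hk, pvFlush_eq]
      simp [pvGroups, pvEmit]
  | cons seg rest ih =>
    intro result run k hk hall
    rw [pvLoopA]
    by_cases hf : pvIsFiller ((pvGet? seg "text").getD "") = true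
    · have hkseg1 : (pvKey seg).1 = true := by simpa only [pvKey] using hf
      rw [if_pos hf]
      cases hlast : run.getLast? with
      | none =>
        have hrun : run = [] := List.getLast?_eq_none_iff.mp hlast
        subst hrun
        show pvLoopA result ([] ++ [seg]) rest = _
        rw [List.nil_append, ih result [seg] (pvKey seg) hkseg1 (by simp)]
        simp
      | some last =>
        have hmem : last ∈ run := List.mem_of_getLast? hlast
        have hrun : run ≠ [] := by intro h; subst h; simp at hmem
        have hlk : pvKey last = k := hall last hmem
        have hsp : pvGet? last "speaker" = k.2 := by
          rw [← hlk]; simp [pvKey]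
        show (if pvGet? last "speaker" ≠ pvGet? seg "speaker" then
            pvLoopA (pvFlush result run) [seg] rest
          else pvLoopA result (run ++ [seg]) rest) = _
        by_cases hd : pvGet? last "speaker" ≠ pvGet? seg "speaker"
        · rw [if_pos hd, ih (pvFlush result run) [seg] (pvKey seg) hkseg1 (by simp)]
          have hkne : pvKey seg ≠ k := by
            intro h
            apply hd
            rw [hsp, ← h]
            simp [pvKey]
          rw [pvGroups_run k run (seg :: rest) hrun hall (by simpa using hkne),
            pvEmit_filler_group k run hk, pvFlush_eq]
          simp
        · rw [if_neg hd]
          have hspe : pvGet? last "speaker" = pvGet? seg "speaker" := by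
            by_contra h; exact hd h
          have hkseg : pvKey seg = k := by
            have hk2 : (pvKey seg).2 = k.2 := by rw [← hsp, hspe]; simp [pvKey]
            have := Prod.ext_iff.mpr ⟨hkseg1.trans hk.symm, hk2⟩
            exact this
          rw [ih result (run ++ [seg]) k hk (by
            intro t ht
            rcases List.mem_append.mp ht with h | h
            · exact hall t h
            · simp at h; subst h; exact hkseg)]
          simp
    · rw [if_neg hf]
      rw [ih (pvFlush result run ++ [seg]) [] (true, none) rfl (by simp), List.nil_append]
      have hkseg1 : (pvKey seg).1 = false := by
        simp only [pvKey]; exact Bool.not_eq_true _ |>.mp hf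
      have hng := pvEmit_groups_nonfiller seg rest hkseg1
      cases hrun : run with
      | nil => simp [pvFlush, hng]
      | cons a as =>
        rw [← hrun]
        have hkne : pvKey seg ≠ k := by
          intro h; rw [h] at hkseg1; rw [hk] at hkseg1; exact Bool.true_eq_false.mp hkseg1 |>.elim
        rw [pvGroups_run k run (seg :: rest) (by simp [hrun]) hall (by simpa using hkne),
          pvEmit_filler_group k run hk, pvFlush_eq, hng]
        simp

-- ===== B-side lemmas: run-length arrays on one maximal run =====

theorem pvPreAux_repl (k : Bool × Option String) (rest : List (Bool × Option String)) :
    ∀ (j c : Nat), pvPreAux (List.replicate j k ++ rest) k c =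
      List.range' (c + 1) j ++ pvPreAux rest k (c + j) := by
  intro j
  induction j with
  | zero => intro c; simp [List.range']
  | succ j' ih =>
    intro c
    rw [List.replicate_succ, List.cons_append, pvPreAux]
    simp only [if_pos trivial, eq_self_iff_true, if_true]
    rw [ih (c + 1), List.range'_succ]
    simp [Nat.add_assoc, Nat.add_comm 1 j']

theorem pvPreAux_ne (rest : List (Bool × Option String)) (k : Bool × Option String) (c : Nat)
    (h : ∀ r ∈ rest.head?, r ≠ k) : pvPreAux rest k c = pvPre rest := by
  cases rest with
  | nil => simp [pvPreAux, pvPre]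
  | cons r rs =>
    have : r ≠ k := h r (by simp)
    rw [pvPreAux, pvPre]
    simp [this]

theorem pvPre_repl (k : Bool × Option String) (rest : List (Bool × Option String))
    (m : Nat) (hm : 1 ≤ m) (h : ∀ r ∈ rest.head?, r ≠ k) :
    pvPre (List.replicate m k ++ rest) = List.range' 1 m ++ pvPre rest := by
  cases m with
  | zero => omega
  | succ m' =>
    rw [List.replicate_succ, List.cons_append, pvPre, pvPreAux_repl, pvPreAux_ne rest k _ h,
      List.range'_succ]
    simp

theorem pvSuf_repl (k : Bool × Option String) (rest : List (Bool × Option String))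
    (h : ∀ r ∈ rest.head?, r ≠ k) :
    ∀ (j : Nat), pvSuf (List.replicate j k ++ rest) =
      (List.range' 1 j).reverse ++ pvSuf rest := by
  intro j
  induction j with
  | zero => simp [List.range']
  | succ j' ih =>
    cases hj : j' with
    | zero =>
      subst hj
      simp only [List.replicate, List.nil_append]
      cases rest with
      | nil => simp [pvSuf, List.range']
      | cons r rs =>
        have hr : r ≠ k := h r (by simp)
        have hkr : ¬ (k = r) := fun he => hr (Eq.symm he)
        show pvSuf (k :: r :: rs) = _
        rw [pvSuf, if_neg hkr]
        simp [List.range']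
    | succ j'' =>
      subst hj
      have hcons : List.replicate (j'' + 1 + 1) k ++ rest =
          k :: k :: (List.replicate j'' k ++ rest) := by
        simp [List.replicate_succ]
      rw [hcons]
      rw [pvSuf]
      have hcons2 : k :: (List.replicate j'' k ++ rest) = List.replicate (j'' + 1) k ++ rest := by
        rw [List.replicate_succ, List.cons_append]
      simp only [if_pos trivial, eq_self_iff_true, if_true]
      rw [hcons2, ih]
      have hrr : List.range' 1 (j'' + 1) = List.range' 1 j'' ++ [1 + 1 * j''] :=
        List.range'_concat (s := 1) (n := j'')
      have hhead : ((List.range' 1 (j'' + 1)).reverse ++ pvSuf rest).headD 0 = j'' + 1 := by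
        rw [hrr]
        simp [Nat.add_comm 1 j'']
      rw [hhead]
      have h2 : List.range' 1 (j'' + 1 + 1) = List.range' 1 (j'' + 1) ++ [1 + 1 * (j'' + 1)] :=
        List.range'_concat (s := 1) (n := j'' + 1)
      rw [h2]
      simp only [List.reverse_append, List.reverse_cons, List.reverse_nil, List.nil_append,
        List.singleton_append, List.cons_append, List.append_assoc]
      have h3 : 1 + 1 * (j'' + 1) = j'' + 1 + 1 := by omega
      rw [h3]

-- the mask decision is uniform over one run: l + r = m + 1 at every index
theorem pvSelect_run (k : Bool × Option String) (m : Nat)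
    (A : List (List (String × String))) (B : List (Bool × Option String))
    (C D : List Nat) :
    ∀ (run : List (List (String × String))) (j s : Nat), run.length = j → s + j = m →
      pvSelect (run ++ A) (List.replicate j k ++ B) (List.range' (s + 1) j ++ C)
        ((List.range' 1 j).reverse ++ D) =
      (if k.1 && decide (3 ≤ m) then [] else run) ++ pvSelect A B C D := by
  intro run
  induction run with
  | nil =>
    intro j s hj _
    simp at hj
    subst hj
    simp only [List.replicate, List.range', List.nil_append, List.reverse_nil]
    cases (k.1 && decide (3 ≤ m)) <;> simp
  | cons seg run' ih =>
    intro j s hj hs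
    cases j with
    | zero => simp at hj
    | succ j'' =>
      have hj' : run'.length = j'' := by simpa using hj
      rw [List.replicate_succ, List.range'_succ, List.range'_concat]
      simp only [List.cons_append, List.reverse_append, List.reverse_cons, List.reverse_nil,
        List.nil_append, List.singleton_append]
      rw [pvSelect]
      have hdec : decide (4 ≤ s + 1 + (1 + 1 * j'')) = decide (3 ≤ m) := by
        have : (4 ≤ s + 1 + (1 + 1 * j'')) ↔ (3 ≤ m) := by omega
        exact decide_eq_decide.mpr this
      rw [hdec]
      have ihh := ih j'' (s + 1) hj' (by omega)
      by_cases hc : (k.1 && decide (3 ≤ m)) = true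
      · rw [if_pos hc]
        rw [ihh, hc]
        simp
      · rw [if_neg hc]
        rw [ihh, Bool.not_eq_true _ |>.mp hc]
        simp

-- B equals the group view
theorem pvSelect_eq_emit (segs : List (List (String × String))) :
    pvSelect segs (segs.map pvKey) (pvPre (segs.map pvKey)) (pvSuf (segs.map pvKey)) =
      pvEmit (pvGroups segs) := by
  induction segs using pvGroups.induct with
  | case1 => simp [pvSelect, pvPre, pvSuf, pvGroups, pvEmit]
  | case2 seg rest ih =>
    set run := seg :: rest.takeWhile (fun t => pvKey t == pvKey seg) with hrun
    set rest' := rest.dropWhile (fun t => pvKey t == pvKey seg) with hrest'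
    have hsplit : seg :: rest = run ++ rest' := by
      rw [hrun, hrest', List.cons_append, List.takeWhile_append_dropWhile]
    have hallrun : ∀ t ∈ run, pvKey t = pvKey seg := by
      intro t ht
      rw [hrun] at ht
      rcases List.mem_cons.mp ht with h | h
      · rw [h]
      · simpa using List.mem_takeWhile_imp h
    have hmaprun : run.map pvKey = List.replicate run.length (pvKey seg) := by
      have h := List.eq_replicate_of_mem (l := run.map pvKey) (a := pvKey seg)
        (by intro x hx
            rcases List.mem_map.mp hx with ⟨t, ht, hxt⟩
            rw [← hxt]; exact hallrun t ht)
      simpa using h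
    have hheadne : ∀ r ∈ (rest'.map pvKey).head?, r ≠ pvKey seg := by
      intro r hr
      rw [List.head?_map] at hr
      cases hh : rest'.head? with
      | none => rw [hh] at hr; simp at hr
      | some x =>
        rw [hh] at hr
        simp only [Option.map_some, Option.mem_some_iff] at hr
        have h0 := List.head?_dropWhile_not (fun t => pvKey t == pvKey seg) rest
        rw [← hrest', hh] at h0
        simp only [Option.all_some] at h0
        rw [← hr]
        simpa using h0
    have hmlen : 1 ≤ run.length := by rw [hrun]; simp
    have hmap : (run ++ rest').map pvKey =
        List.replicate run.length (pvKey seg) ++ rest'.map pvKey := by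
      rw [List.map_append, hmaprun]
    conv_lhs => rw [hsplit, hmap]
    rw [pvPre_repl _ _ _ hmlen hheadne, pvSuf_repl _ _ hheadne]
    have hsel := pvSelect_run (pvKey seg) run.length rest' (rest'.map pvKey)
      (pvPre (rest'.map pvKey)) (pvSuf (rest'.map pvKey)) run run.length 0 rfl (by omega)
    rw [Nat.zero_add] at hsel
    rw [hsel, ih]
    rw [pvGroups, ← hrun, ← hrest', pvEmit]
    by_cases hc : ((pvKey seg).1 && decide (3 ≤ run.length)) = true
    · rw [if_pos hc, if_pos hc]; simp
    · rw [if_neg hc, if_neg hc]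

-- ===== VERDICT (by name: the statement is the Claim_ definition above) =====
theorem filter_fillers_spec : Claim_equal_filter_fillers := by
  intro segments _ _
  unfold Spec_filter_fillers filter_fillers filter_fillers_alt
  rw [pvSelect_eq_emit]
  cases segments with
  | nil => simp [pvGroups, pvEmit]
  | cons s rest =>
    rw [if_neg (by simp)]
    simpa using pvLoopA_eq (s :: rest) [] [] (true, none) rfl (by simp)
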